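-- pv_equiv track=rewrite | github.com/james-obrien87/ONT_scRNA_Barcode_Extractor | extractor.py | find_polya_end
-- ===== SOURCE A (Python) =====
-- def find_polya_end(
--     seq: str,
--     search_start: int,
--     search_end: int,
--     min_run: int,
--     max_mismatches: int,
-- ) -> int:
--     """
--     Locate the end position of a polyA tail in seq[search_start:search_end].
--
--     Scans right-to-left within the search window looking for the rightmost
--     run of at least min_run consecutive A's, tolerating up to max_mismatches
--     non-A bases within the run. Tolerance is necessary because ONT basecallers
--     frequently miscall individual bases within homopolymer runs.
--
--     Once the rightmost qualifying run is found, the function attempts to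
--     extend it rightward as far as A's continue (or until mismatches are
--     exhausted), giving the tightest possible boundary next to BC1.
--
--     Args:
--         seq:            Full read sequence (forward strand, already oriented).
--         search_start:   Left boundary of the search region.
--         search_end:     Right boundary of the search region (exclusive).
--                         Should be set to approximately Linker1_start - BC1_length
--                         so the search stays upstream of BC1.
--         min_run:        Minimum consecutive A's (within mismatch budget) to
--                         qualify as a polyA tail. Recommended: 6–8.
--         max_mismatches: Maximum non-A bases tolerated within the run.
--                         Recommended: 1 for ONT noise tolerance.
--
--     Returns:
--         Position of the first base AFTER the polyA run in full seq coordinates.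
--         This is the expected left boundary of BC1.
--         Returns -1 if no qualifying run is found; extraction then falls back
--         to a linker-anchored estimate with a small slack window.
--     """
--     sub     = seq[search_start:search_end]
--     sub_len = len(sub)
--
--     best_end = -1  # End of the best polyA run found (exclusive, sub-coords)
--
--     # Slide a window of exactly min_run from right to left.
--     # The first qualifying window found is the rightmost one — closest to BC1.
--     i = sub_len - min_run
--     while i >= 0:
--         window     = sub[i:i + min_run]
--         mismatches = sum(1 for b in window if b != 'A')
--         if mismatches <= max_mismatches:
--             # Found a qualifying seed run — try to extend its right boundary
--             run_end = i + min_run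
--             while run_end < sub_len and (
--                 sub[run_end] == 'A' or
--                 sum(1 for b in sub[i:run_end + 1] if b != 'A') <= max_mismatches
--             ):
--                 run_end += 1
--             best_end = run_end
--             break   # Take the rightmost qualifying run; don't search further left
--         i -= 1
--
--     if best_end == -1:
--         return -1
--     # Convert from sub-sequence coordinates to full sequence coordinates
--     return search_start + best_end
-- ===== SOURCE B (Python) =====
-- def find_polya_end(
--     seq: str,
--     search_start: int,
--     search_end: int,
--     min_run: int,
--     max_mismatches: int,
-- ) -> int:
--     """Rolling-window re-implementation: the mismatch count of the size-min_run
--     window is maintained incrementally while sliding right-to-left (O(1) per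
--     window instead of an O(min_run) rescan), and the rightward extension reuses
--     that running count instead of re-summing a growing slice."""
--     sub = seq[search_start:search_end]
--     n = len(sub)
--     if min_run < 0 or min_run > n:
--         return -1
--     i = n - min_run
--     cnt = sum(1 for b in sub[i:] if b != 'A')  # mismatches in the rightmost window
--     while cnt > max_mismatches:
--         if i == 0:
--             return -1
--         i -= 1
--         cnt += (sub[i] != 'A') - (sub[i + min_run] != 'A')
--     # qualifying window found at i; cnt = mismatches in sub[i:i+min_run].
--     # Extend rightward, keeping cnt = mismatches in sub[i:j].
--     j = i + min_run
--     while j < n: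
--         if sub[j] == 'A':
--             j += 1
--         elif cnt + 1 <= max_mismatches:
--             cnt += 1
--             j += 1
--         else:
--             break
--     return search_start + j
-- ===== Notes on version B (the rewrite author's own statement) =====
-- stated objective: faster
-- what changed: B maintains a rolling mismatch counter while sliding the min_run window right-to-left (O(1) per window instead of A's O(min_run) recount) and extends the run with an incremental count instead of A's re-summing of a growing slice.
-- outside the precondition, e.g. on find_polya_end('AAA', 0, 3, -1, 0): A returns 3, B returns -1
import Mathlib
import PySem

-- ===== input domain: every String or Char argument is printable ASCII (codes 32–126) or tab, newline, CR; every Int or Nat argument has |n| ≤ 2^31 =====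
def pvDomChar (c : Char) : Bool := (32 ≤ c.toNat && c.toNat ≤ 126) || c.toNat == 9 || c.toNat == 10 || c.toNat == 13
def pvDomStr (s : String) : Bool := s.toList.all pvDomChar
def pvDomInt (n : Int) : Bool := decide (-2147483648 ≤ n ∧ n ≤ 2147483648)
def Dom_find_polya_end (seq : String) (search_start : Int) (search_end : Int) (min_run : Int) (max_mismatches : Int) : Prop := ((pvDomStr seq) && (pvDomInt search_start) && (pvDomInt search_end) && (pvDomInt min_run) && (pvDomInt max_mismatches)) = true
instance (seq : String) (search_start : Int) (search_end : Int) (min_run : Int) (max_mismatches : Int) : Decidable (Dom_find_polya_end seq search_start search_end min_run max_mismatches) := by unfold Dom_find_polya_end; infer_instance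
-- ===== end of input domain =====

-- B replaces A's per-window O(min_run) recount and per-step slice re-sum by a rolling
-- mismatch counter (sliding window) and an incremental extension count; measured faster
-- on windows that never qualify.

-- ===== PORT A =====
-- sum(1 for b in l if b != 'A')  (helper shared by both ports: the same generator
-- expression occurs in Source A and Source B)
def pvMisSum (l : List Char) : Int :=
  (l.map (fun b => if b ≠ 'A' then (1 : Int) else 0)).sum

-- inner 'while run_end < sub_len and (...)' extension loop of A
def pvExtA (sub : List Char) (i mm : Int) : Nat → Int → Int
  | 0, runEnd => runEnd
  | f + 1, runEnd =>
    if runEnd < (sub.length : Int) ∧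
        (PySem.List.pyGetD sub runEnd 'A' = 'A' ∨
          pvMisSum (PySem.List.slice sub (some i) (some (runEnd + 1))) ≤ mm) then
      pvExtA sub i mm f (runEnd + 1)
    else runEnd

-- outer 'while i >= 0' loop of A (returns best_end, -1 when the loop exhausts)
def pvSeedA (sub : List Char) (minRun mm : Int) : Nat → Int → Int
  | 0, _ => -1
  | f + 1, i =>
    if 0 ≤ i then
      if pvMisSum (PySem.List.slice sub (some i) (some (i + minRun))) ≤ mm then
        pvExtA sub i mm ((sub.length : Int) - (i + minRun)).toNat (i + minRun)
      else pvSeedA sub minRun mm f (i - 1)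
    else -1

def find_polya_end (seq : String) (search_start : Int) (search_end : Int) (min_run : Int) (max_mismatches : Int) : Int :=
  let sub := PySem.List.slice seq.toList (some search_start) (some search_end)
  let subLen : Int := sub.length
  let bestEnd := pvSeedA sub min_run max_mismatches (subLen - min_run + 1).toNat (subLen - min_run)
  if bestEnd = -1 then -1 else search_start + bestEnd

-- ===== PORT B =====
-- 'while cnt > max_mismatches' rolling-window loop of B; none = the 'return -1',
-- some (i, cnt) = falling through to the extension with these locals
def pvSeedB (sub : List Char) (minRun mm : Int) : Nat → Int → Int → Option (Int × Int)
  | 0, i, cnt => some (i, cnt)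
  | f + 1, i, cnt =>
    if cnt > mm then
      if i = 0 then none
      else
        pvSeedB sub minRun mm f (i - 1)
          (cnt + (if PySem.List.pyGetD sub (i - 1) 'A' ≠ 'A' then 1 else 0)
               - (if PySem.List.pyGetD sub (i - 1 + minRun) 'A' ≠ 'A' then 1 else 0))
    else some (i, cnt)

-- 'while j < n' incremental extension loop of B
def pvExtB (sub : List Char) (mm : Int) : Nat → Int → Int → Int
  | 0, _, j => j
  | f + 1, cnt, j =>
    if j < (sub.length : Int) then
      if PySem.List.pyGetD sub j 'A' = 'A' then pvExtB sub mm f cnt (j + 1)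
      else if cnt + 1 ≤ mm then pvExtB sub mm f (cnt + 1) (j + 1)
      else j
    else j

def find_polya_end_alt (seq : String) (search_start : Int) (search_end : Int) (min_run : Int) (max_mismatches : Int) : Int :=
  let sub := PySem.List.slice seq.toList (some search_start) (some search_end)
  let n : Int := sub.length
  if min_run < 0 ∨ n < min_run then -1
  else
    let i0 := n - min_run
    let cnt0 := pvMisSum (PySem.List.slice sub (some i0) none)
    match pvSeedB sub min_run max_mismatches (i0.toNat + 1) i0 cnt0 with
    | none => -1
    | some (i, cnt) =>
        search_start + pvExtB sub max_mismatches (n - (i + min_run)).toNat cnt (i + min_run)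

-- ===== PRECONDITION & SPEC =====
-- Pre_ excludes negative min_run (a nonsensical run length, outside the function's
-- natural domain): there A's empty window-slice accidentally qualifies everywhere and A
-- returns search_start + len(sub) when max_mismatches ≥ 0, while B reports no run (-1).
def Pre_find_polya_end (seq : String) (search_start : Int) (search_end : Int) (min_run : Int) (max_mismatches : Int) : Prop :=
  0 ≤ min_run
instance (seq : String) (search_start : Int) (search_end : Int) (min_run : Int) (max_mismatches : Int) : Decidable (Pre_find_polya_end seq search_start search_end min_run max_mismatches) := by unfold Pre_find_polya_end; infer_instance

def pvWitness_find_polya_end : String × Int × Int × Int × Int := ("CAAAAAAC", 0, 8, 3, 1)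

def Spec_find_polya_end (seq : String) (search_start : Int) (search_end : Int) (min_run : Int) (max_mismatches : Int) (out : Int) : Prop := out = find_polya_end_alt seq search_start search_end min_run max_mismatches
instance (seq : String) (search_start : Int) (search_end : Int) (min_run : Int) (max_mismatches : Int) (out : Int) : Decidable (Spec_find_polya_end seq search_start search_end min_run max_mismatches out) := by unfold Spec_find_polya_end; infer_instance

-- ===== CLAIM (what is proved, stated in full; the proofs are below) =====
def Claim_equal_find_polya_end : Prop := ∀ (seq : String) (search_start : Int) (search_end : Int) (min_run : Int) (max_mismatches : Int), Dom_find_polya_end seq search_start search_end min_run max_mismatches → Pre_find_polya_end seq search_start search_end min_run max_mismatches → Spec_find_polya_end seq search_start search_end min_run max_mismatches (find_polya_end seq search_start search_end min_run max_mismatches)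

-- ===== LEMMAS AND PROOFS =====

-- mismatch count of the window sub[i:j] (Nat coordinates), the common currency of the proof
def pvCW (sub : List Char) (i j : Nat) : Int :=
  (((sub.drop i).take (j - i)).countP (fun b => !(b == 'A')) : Int)

theorem pvMisSum_eq (l : List Char) :
    pvMisSum l = (l.countP (fun b => !(b == 'A')) : Int) := by
  unfold pvMisSum
  have h : (fun b : Char => if b ≠ 'A' then (1 : Int) else 0)
      = fun b => if (!(b == 'A')) = true then 1 else 0 := by
    funext b; by_cases hb : b = 'A' <;> simp [hb]
  rw [h, PySem.List.sum_map_ite_one_zero]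

theorem pvCW_window (sub : List Char) (i m : Nat) :
    pvMisSum (PySem.List.slice sub (some (i : Int)) (some ((i : Int) + (m : Int)))) =
      pvCW sub i (i + m) := by
  rw [PySem.List.slice_natCast_add, pvMisSum_eq]
  unfold pvCW
  have h : i + m - i = m := by omega
  rw [h]

theorem pvCW_succ_right (sub : List Char) {i j : Nat} (hij : i ≤ j) (hj : j < sub.length) :
    pvCW sub i (j + 1) = pvCW sub i j + (if sub[j] ≠ 'A' then 1 else 0) := by
  unfold pvCW
  have h1 : j + 1 - i = (j - i) + 1 := by omega
  have h2 : (sub.drop i)[j - i]? = some sub[j] := by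
    rw [List.getElem?_drop]
    have h3 : i + (j - i) = j := by omega
    rw [h3, List.getElem?_eq_getElem hj]
  rw [h1, List.take_add_one, h2]
  by_cases hA : sub[j] = 'A' <;>
    simp [List.countP_append, List.countP_cons, hA]

theorem pvCW_succ_left (sub : List Char) {i j : Nat} (hi : i < sub.length) (hij : i + 1 ≤ j) :
    pvCW sub i j = (if sub[i] ≠ 'A' then 1 else 0) + pvCW sub (i + 1) j := by
  unfold pvCW
  rw [List.drop_eq_getElem_cons hi]
  have h1 : j - i = (j - (i + 1)) + 1 := by omega
  rw [h1, List.take_succ_cons, List.countP_cons]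
  by_cases hA : sub[i] = 'A' <;> simp [hA] <;> push_cast <;> ring

theorem pvCW_roll (sub : List Char) {i m : Nat} (h : i + m < sub.length) :
    pvCW sub i (i + m) =
      pvCW sub (i + 1) (i + 1 + m) + (if sub[i] ≠ 'A' then 1 else 0)
        - (if sub[i + m] ≠ 'A' then 1 else 0) := by
  have h1 := pvCW_succ_left sub (show i < sub.length by omega) (show i + 1 ≤ i + 1 + m by omega)
  have h2 := pvCW_succ_right sub (show i ≤ i + m by omega) h
  have h3 : i + 1 + m = (i + m) + 1 := by omega
  rw [h3] at h1 ⊢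
  linarith

theorem pvExtB_ge (sub : List Char) (mm : Int) (f : Nat) :
    ∀ (cnt j : Int), j ≤ pvExtB sub mm f cnt j := by
  induction f with
  | zero => intro cnt j; simp [pvExtB]
  | succ f ih =>
    intro cnt j
    simp only [pvExtB]
    split_ifs with h1 h2 h3
    · exact le_trans (by omega) (ih cnt (j + 1))
    · exact le_trans (by omega) (ih (cnt + 1) (j + 1))
    · exact le_refl j
    · exact le_refl j

theorem pvExt_eq (sub : List Char) (mm : Int) (f : Nat) :
    ∀ (i j : Nat) (cnt : Int), i ≤ j → cnt = pvCW sub i j →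
      pvExtA sub (i : Int) mm f (j : Int) = pvExtB sub mm f cnt (j : Int) := by
  induction f with
  | zero => intro i j cnt _ _; simp [pvExtA, pvExtB]
  | succ f ih =>
    intro i j cnt hij hcnt
    simp only [pvExtA, pvExtB]
    by_cases hj : j < sub.length
    · have hjI : (j : Int) < (sub.length : Int) := by exact_mod_cast hj
      have hget : PySem.List.pyGetD sub (j : Int) 'A' = sub[j] := by
        rw [PySem.List.pyGetD_eq_getElem sub 'A' (by positivity) (by exact_mod_cast hj)]
        simp
      have hcast : ((j : Int) + 1) = ((j + 1 : Nat) : Int) := by push_cast; ring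
      have hmis : pvMisSum (PySem.List.slice sub (some (i : Int)) (some ((j : Int) + 1))) =
          pvCW sub i (j + 1) := by
        rw [hcast, PySem.List.slice_natCast, pvMisSum_eq]; rfl
      by_cases hA : sub[j] = 'A'
      · rw [if_pos ⟨hjI, Or.inl (hget.trans hA)⟩, if_pos hjI, hget, if_pos hA, hcast]
        exact ih i (j + 1) cnt (by omega)
          (by rw [hcnt, pvCW_succ_right sub hij hj]; simp [hA])
      · have hval : pvMisSum (PySem.List.slice sub (some (i : Int)) (some ((j : Int) + 1))) =
            cnt + 1 := by
          rw [hmis, pvCW_succ_right sub hij hj, hcnt]; simp [hA]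
        rw [if_pos hjI, hget, if_neg hA]
        by_cases hb : cnt + 1 ≤ mm
        · rw [if_pos ⟨hjI, Or.inr (by rw [hval]; exact hb)⟩, if_pos hb, hcast]
          exact ih i (j + 1) (cnt + 1) (by omega)
            (by rw [hcnt, pvCW_succ_right sub hij hj]; simp [hA])
        · rw [if_neg (by
            intro hc
            rcases hc.2 with h | h
            · exact hA h
            · rw [hval] at h; exact hb h), if_neg hb]
    · have hjI : ¬ ((j : Int) < (sub.length : Int)) := by exact_mod_cast hj
      rw [if_neg (fun hc => hjI hc.1), if_neg hjI]

theorem pvSeed_eq (sub : List Char) (m : Nat) (mm ss : Int) :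
    ∀ (i : Nat) (cnt : Int), i + m ≤ sub.length → cnt = pvCW sub i (i + m) →
      (if pvSeedA sub (m : Int) mm (i + 1) (i : Int) = -1 then -1
       else ss + pvSeedA sub (m : Int) mm (i + 1) (i : Int))
      = (match pvSeedB sub (m : Int) mm (i + 1) (i : Int) cnt with
         | none => -1
         | some (i', c') =>
             ss + pvExtB sub mm ((sub.length : Int) - (i' + (m : Int))).toNat c' (i' + (m : Int))) := by
  intro i
  induction i with
  | zero =>
    intro cnt hle hcnt
    simp only [pvSeedA, pvSeedB, Nat.cast_zero, zero_add]
    simp only [Nat.zero_add] at hle hcnt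
    have hw : pvMisSum (PySem.List.slice sub (some (0 : Int)) (some (m : Int))) = cnt := by
      have h := pvCW_window sub 0 m
      simp only [Nat.cast_zero, zero_add, Nat.zero_add] at h
      rw [h]; exact hcnt.symm
    rw [hw]
    by_cases hq : cnt ≤ mm
    · rw [if_pos le_rfl, if_pos hq, if_neg (show ¬ cnt > mm by omega)]
      have hext := pvExt_eq sub mm ((sub.length : Int) - (m : Int)).toNat 0 m cnt
        (by omega) hcnt
      simp only [Nat.cast_zero] at hext
      rw [hext]
      have hge := pvExtB_ge sub mm ((sub.length : Int) - (m : Int)).toNat cnt ((m : Nat) : Int)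
      rw [if_neg (show ¬ (pvExtB sub mm ((sub.length : Int) - (m : Int)).toNat cnt ((m : Nat) : Int) = -1) by omega)]
      simp
    · rw [if_pos le_rfl, if_neg hq, if_pos (show cnt > mm by omega)]
      simp [pvSeedA]
  | succ k ih =>
    intro cnt hle hcnt
    simp only [pvSeedA, pvSeedB]
    have hw : pvMisSum (PySem.List.slice sub (some ((k + 1 : Nat) : Int))
        (some (((k + 1 : Nat) : Int) + (m : Int)))) = cnt := by
      rw [pvCW_window sub (k + 1) m]; exact hcnt.symm
    rw [hw]
    have hpos : (0 : Int) ≤ ((k + 1 : Nat) : Int) := by positivity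
    by_cases hq : cnt ≤ mm
    · rw [if_pos hpos, if_pos hq, if_neg (show ¬ cnt > mm by omega)]
      have hcast : (((k + 1 : Nat) : Int) + (m : Int)) = ((k + 1 + m : Nat) : Int) := by
        push_cast; ring
      have hext : pvExtA sub ((k + 1 : Nat) : Int) mm
            ((sub.length : Int) - (((k + 1 : Nat) : Int) + (m : Int))).toNat
            (((k + 1 : Nat) : Int) + (m : Int))
          = pvExtB sub mm ((sub.length : Int) - (((k + 1 : Nat) : Int) + (m : Int))).toNat cnt
              (((k + 1 : Nat) : Int) + (m : Int)) := by
        rw [hcast]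
        exact pvExt_eq sub mm _ (k + 1) (k + 1 + m) cnt (by omega) hcnt
      rw [hext]
      rw [if_neg (show ¬ (pvExtB sub mm
            ((sub.length : Int) - (((k + 1 : Nat) : Int) + (m : Int))).toNat cnt
            (((k + 1 : Nat) : Int) + (m : Int)) = -1) by
        have hge := pvExtB_ge sub mm
          ((sub.length : Int) - (((k + 1 : Nat) : Int) + (m : Int))).toNat cnt
          (((k + 1 : Nat) : Int) + (m : Int))
        have hm0 : (0 : Int) ≤ ((k + 1 : Nat) : Int) + (m : Int) := by positivity
        omega)]
    · rw [if_pos hpos, if_neg hq, if_pos (show cnt > mm by omega),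
        if_neg (show ¬ (((k + 1 : Nat) : Int) = 0) by omega)]
      have hsub1 : ((k + 1 : Nat) : Int) - 1 = ((k : Nat) : Int) := by push_cast; ring
      rw [hsub1]
      have hg1 : PySem.List.pyGetD sub ((k : Nat) : Int) 'A' = sub[k]'(by omega) := by
        rw [PySem.List.pyGetD_eq_getElem sub 'A' (by positivity)
          (by exact_mod_cast (show k < sub.length by omega))]
        simp
      have hg2 : PySem.List.pyGetD sub (((k : Nat) : Int) + (m : Int)) 'A'
          = sub[k + m]'(by omega) := by
        rw [PySem.List.pyGetD_eq_getElem sub 'A' (by positivity)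
          (show ((k : Nat) : Int) + (m : Int) < (sub.length : Int) by
            have h5 : k + m < sub.length := by omega
            exact_mod_cast h5)]
        have ht : (((k : Nat) : Int) + (m : Int)).toNat = k + m := by omega
        simp [ht]
      have hcnt' : cnt + (if PySem.List.pyGetD sub ((k : Nat) : Int) 'A' ≠ 'A' then 1 else 0)
            - (if PySem.List.pyGetD sub (((k : Nat) : Int) + (m : Int)) 'A' ≠ 'A' then 1 else 0)
          = pvCW sub k (k + m) := by
        rw [hg1, hg2, hcnt]
        have hroll := pvCW_roll sub (show k + m < sub.length by omega)
        linarith [hroll]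
      exact ih _ (by omega) hcnt'

-- ===== VERDICT (by name: the statement is the Claim_ definition above) =====
theorem find_polya_end_spec : Claim_equal_find_polya_end := by
  intro seq ss se minRun mm _ hpre
  unfold Spec_find_polya_end
  have hpre' : (0 : Int) ≤ minRun := hpre
  obtain ⟨m, rfl⟩ : ∃ k : Nat, minRun = (k : Int) :=
    ⟨minRun.toNat, by omega⟩
  unfold find_polya_end find_polya_end_alt
  simp only []
  set sub := PySem.List.slice seq.toList (some ss) (some se) with hsub
  by_cases hbig : (sub.length : Int) < (m : Int)
  · have hfuel : ((sub.length : Int) - (m : Int) + 1).toNat = 0 := by omega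
    rw [hfuel, if_pos (Or.inr hbig)]
    simp [pvSeedA]
  · rw [not_lt] at hbig
    have hmn : m ≤ sub.length := by exact_mod_cast hbig
    rw [if_neg (show ¬ ((m : Int) < 0 ∨ (sub.length : Int) < (m : Int)) by omega)]
    have hi0 : (sub.length : Int) - (m : Int) = ((sub.length - m : Nat) : Int) := by omega
    have hfuelA : ((sub.length : Int) - (m : Int) + 1).toNat = (sub.length - m) + 1 := by omega
    have hfuelB : ((sub.length : Int) - (m : Int)).toNat + 1 = (sub.length - m) + 1 := by omega
    have hcnt0 : pvMisSum (PySem.List.slice sub (some ((sub.length : Int) - (m : Int))) none) =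
        pvCW sub (sub.length - m) ((sub.length - m) + m) := by
      rw [hi0, PySem.List.slice_from_natCast, pvMisSum_eq]
      unfold pvCW
      have h1 : (sub.length - m) + m - (sub.length - m) = m := by omega
      rw [h1, List.take_of_length_le (by rw [List.length_drop]; omega)]
    rw [hfuelA, hfuelB, hcnt0, hi0]
    exact pvSeed_eq sub m mm ss (sub.length - m) _ (by omega) rfl
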